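-- pv_equiv track=rewrite | github.com/caleblevy/splaytrees | completebst.py | complete_bst_preorder
-- ===== SOURCE A (Python) =====
-- def complete_bst_preorder(d, root=None):
--     """Return preorder sequence of complete BST of depth d on nodes
--     1...2^d-1. """
--     if root is None:
--         root = 2**(d-1)
--     yield root
--     if d > 1:
--         for node in complete_bst_preorder(d-1, root-2**(d-2)):
--             yield node
--         for node in complete_bst_preorder(d-1, root+2**(d-2)):
--             yield node
-- ===== SOURCE B (Python) =====
-- def complete_bst_preorder(d, root=None):
--     """Return preorder sequence of complete BST of depth d on nodes
--     1...2^d-1 (iterative, explicit stack)."""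
--     if root is None:
--         root = 2**(d-1)
--     stack = [(d, root)]
--     while stack:
--         cur_d, cur_root = stack.pop()
--         yield cur_root
--         if cur_d > 1:
--             stack.append((cur_d-1, cur_root+2**(cur_d-2)))
--             stack.append((cur_d-1, cur_root-2**(cur_d-2)))
-- ===== Notes on version B (the rewrite author's own statement) =====
-- stated objective: alternative
-- what changed: Replaces A's nested recursive generators with a single iterative loop over an explicit stack of (depth, root) frames, pushing the right child frame before the left so nodes are emitted in the same preorder.
-- outside the precondition, e.g. on complete_bst_preorder(0, None): A returns [0.5], B returns [0.5]
import Mathlib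
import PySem

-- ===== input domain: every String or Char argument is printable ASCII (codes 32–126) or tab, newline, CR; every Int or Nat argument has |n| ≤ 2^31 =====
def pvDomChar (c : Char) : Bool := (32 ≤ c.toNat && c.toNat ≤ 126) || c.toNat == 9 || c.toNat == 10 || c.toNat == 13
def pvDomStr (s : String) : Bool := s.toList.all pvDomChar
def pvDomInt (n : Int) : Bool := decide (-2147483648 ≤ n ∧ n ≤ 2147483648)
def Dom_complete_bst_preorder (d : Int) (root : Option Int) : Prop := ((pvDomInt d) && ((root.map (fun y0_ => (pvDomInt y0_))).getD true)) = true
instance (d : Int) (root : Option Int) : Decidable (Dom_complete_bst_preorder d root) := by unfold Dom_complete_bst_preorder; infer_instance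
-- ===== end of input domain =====

-- B replaces A's nested recursive generators by a single iterative loop over an explicit
-- stack (push right then left), emitting each node once; return-value equivalence only
-- (both are generators, ported as the list of yielded values).

-- ===== PORT A =====
-- A's recursion after the default-root resolution: yield root; if d > 1 recurse left then right.
def bstA_go (d : Int) (root : Int) : List Int :=
  root ::
    (if _h : d > 1 then
      bstA_go (d-1) (root - 2^((d-2).toNat)) ++ bstA_go (d-1) (root + 2^((d-2).toNat))
    else [])
termination_by d.toNat
decreasing_by all_goals omega

def complete_bst_preorder (d : Int) (root : Option Int) : List Int :=
  bstA_go d (match root with | none => 2^((d-1).toNat) | some r => r)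

-- ===== PORT B =====
-- weight for termination of the stack loop
def bstB_weight (s : List (Int × Int)) : Nat := (s.map (fun p => 3 ^ p.1.toNat)).sum

theorem bstB_weight_cons (p : Int × Int) (s : List (Int × Int)) :
    bstB_weight (p :: s) = 3 ^ p.1.toNat + bstB_weight s := by
  simp [bstB_weight]

theorem bstB_dec {cd : Int} (h : cd > 1) (s : List (Int × Int)) (l r : Int) :
    bstB_weight ((cd-1, l) :: (cd-1, r) :: s) < bstB_weight ((cd, l) :: s) := by
  have h1 : (cd-1).toNat + 1 = cd.toNat := by omega
  simp only [bstB_weight_cons]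
  have : 3 ^ (cd-1).toNat + 3 ^ (cd-1).toNat < 3 ^ cd.toNat := by
    rw [← h1, pow_succ]
    have : 0 < 3 ^ (cd-1).toNat := by positivity
    omega
  omega

-- iterative loop: pop a frame, emit its root, push right then left child frames
def bstB_go (stack : List (Int × Int)) : List Int :=
  match stack with
  | [] => []
  | (cd, cr) :: rest =>
    if h : cd > 1 then
      cr :: bstB_go ((cd-1, cr - 2^((cd-2).toNat)) :: (cd-1, cr + 2^((cd-2).toNat)) :: rest)
    else
      cr :: bstB_go rest
termination_by bstB_weight stack
decreasing_by
  · exact bstB_dec h rest _ _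
  · simp [bstB_weight_cons]

def complete_bst_preorder_alt (d : Int) (root : Option Int) : List Int :=
  bstB_go [(d, match root with | none => 2^((d-1).toNat) | some r => r)]

-- ===== PRECONDITION & SPEC =====
-- Pre_ excludes only d ≤ 0 with root omitted: there Python's 2**(d-1) is a float, so A
-- yields a non-int value (outside the declared return type list[int]).
def Pre_complete_bst_preorder (d : Int) (root : Option Int) : Prop :=
  root = none → 1 ≤ d
instance (d : Int) (root : Option Int) : Decidable (Pre_complete_bst_preorder d root) := by
  unfold Pre_complete_bst_preorder; infer_instance

def pvWitness_complete_bst_preorder : Int × Option Int := (3, none)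

def Spec_complete_bst_preorder (d : Int) (root : Option Int) (out : List Int) : Prop := out = complete_bst_preorder_alt d root
instance (d : Int) (root : Option Int) (out : List Int) : Decidable (Spec_complete_bst_preorder d root out) := by unfold Spec_complete_bst_preorder; infer_instance

-- ===== CLAIM (what is proved, stated in full; the proofs are below) =====
def Claim_equal_complete_bst_preorder : Prop := ∀ (d : Int) (root : Option Int), Dom_complete_bst_preorder d root → Pre_complete_bst_preorder d root → Spec_complete_bst_preorder d root (complete_bst_preorder d root)

-- ===== LEMMAS AND PROOFS =====

-- the stack loop processes the frames left to right, each as A's recursion would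
theorem bstB_go_eq (s : List (Int × Int)) :
    bstB_go s = s.flatMap (fun p => bstA_go p.1 p.2) := by
  induction s using bstB_go.induct with
  | case1 => simp [bstB_go]
  | case2 cd cr rest h ih =>
      rw [bstB_go, dif_pos h, ih]
      conv_rhs => rw [List.flatMap_cons, bstA_go.eq_def]
      simp [dif_pos h]
  | case3 cd cr rest h ih =>
      rw [bstB_go, dif_neg h, ih]
      conv_rhs => rw [List.flatMap_cons, bstA_go.eq_def]
      simp [dif_neg h]

-- ===== VERDICT (by name: the statement is the Claim_ definition above) =====
theorem complete_bst_preorder_spec : Claim_equal_complete_bst_preorder := by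
  intro d root _ _
  unfold Spec_complete_bst_preorder complete_bst_preorder complete_bst_preorder_alt
  rw [bstB_go_eq]
  simp
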